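-- pv_equiv track=rewrite | github.com/moonchop/Algorithm | 문자열/그룹 단어 체커.py | isWordCheck
-- ===== SOURCE A (Python) =====
-- def isWordCheck(word):
--   dupe={}
--   dupe[word[0]]=1
--   for i in range(1,len(word)):
--
--     if word[i] == word[i-1]:
--       if word[i] not in dupe:
--         dupe[word[i]] = 1
--
--     else:
--       if word[i] in dupe:
--         return False
--       else:
--         dupe[word[i]] = 1
--   return True
-- ===== SOURCE B (Python) =====
-- def isWordCheck(word):
--     # Collapse consecutive equal characters into the list of run keys,
--     # then the word is a group word iff those keys are all distinct.
--     keys = []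
--     for c in word:
--         if not keys or keys[-1] != c:
--             keys.append(c)
--     return len(keys) == len(set(keys))
-- ===== Notes on version B (the rewrite author's own statement) =====
-- stated objective: simpler
-- what changed: B collapses consecutive runs into their list of key characters and returns len(keys) == len(set(keys)), instead of A's single pass carrying a seen-dictionary with an early False return.
-- crash fix: On the empty string A raises IndexError (it indexes word[0]); B returns True. — e.g. on isWordCheck(""): A raises IndexError, B returns true
import Mathlib
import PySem

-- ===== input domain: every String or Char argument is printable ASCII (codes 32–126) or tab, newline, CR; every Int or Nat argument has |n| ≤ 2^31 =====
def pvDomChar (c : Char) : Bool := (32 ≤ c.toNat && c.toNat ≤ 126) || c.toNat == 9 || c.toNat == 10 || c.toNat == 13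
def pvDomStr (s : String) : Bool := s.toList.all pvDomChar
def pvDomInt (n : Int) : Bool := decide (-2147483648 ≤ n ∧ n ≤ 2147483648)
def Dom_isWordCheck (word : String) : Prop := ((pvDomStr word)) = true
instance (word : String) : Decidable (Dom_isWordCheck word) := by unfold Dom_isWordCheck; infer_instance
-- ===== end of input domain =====

-- B collapses consecutive runs into their key characters and checks those keys are distinct via a set,
-- instead of A's single pass with a seen-dictionary and early return; same cost, simpler decomposition.


-- ===== PORT A =====
-- the for-loop: prev is word[i-1], rest the characters from position i on, dupe the dict
def isWordCheckLoop (prev : Char) (rest : List Char) (dupe : PySem.Dict Char Int) : Bool :=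
  match rest with
  | [] => true
  | c :: t =>
    if c == prev then
      isWordCheckLoop c t (if dupe.contains c then dupe else dupe.insert c 1)
    else
      if dupe.contains c then false
      else isWordCheckLoop c t (dupe.insert c 1)

def isWordCheck (word : String) : Bool :=
  match word.toList with
  | [] => true   -- Python A raises IndexError here (word[0]); excluded by Pre_isWordCheck
  | c :: t => isWordCheckLoop c t (PySem.Dict.empty.insert c 1)

-- ===== PORT B =====
-- the for-loop building the list of run keys ('not keys or keys[-1] != c' → append)
def isWordCheckKeys (keys : List Char) (cs : List Char) : List Char :=
  match cs with
  | [] => keys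
  | c :: t =>
      isWordCheckKeys (if keys.isEmpty || !(keys.getLast? == some c) then keys ++ [c] else keys) t

def isWordCheck_alt (word : String) : Bool :=
  let keys := isWordCheckKeys [] word.toList
  keys.length == (PySem.Set.ofList keys).length

-- ===== PRECONDITION & SPEC =====
-- Pre_ excludes only the empty string, on which A raises IndexError at word[0].
def Pre_isWordCheck (word : String) : Prop := word ≠ ""
instance (word : String) : Decidable (Pre_isWordCheck word) := by unfold Pre_isWordCheck; infer_instance
def pvWitness_isWordCheck : String := "aabba"

-- On the empty string A raises IndexError (it indexes word[0]); B returns True.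
def Raises_isWordCheck (word : String) : Prop := word = ""
instance (word : String) : Decidable (Raises_isWordCheck word) := by unfold Raises_isWordCheck; infer_instance
def pvRaiseWitness_isWordCheck : String := ""
def pvRaiseWitnessOut_isWordCheck : Bool := true

def Spec_isWordCheck (word : String) (out : Bool) : Prop := out = isWordCheck_alt word
instance (word : String) (out : Bool) : Decidable (Spec_isWordCheck word out) := by unfold Spec_isWordCheck; infer_instance

-- ===== CLAIM (what is proved, stated in full; the proofs are below) =====
def Claim_equal_isWordCheck : Prop := ∀ (word : String), Dom_isWordCheck word → Pre_isWordCheck word → Spec_isWordCheck word (isWordCheck word)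
def Claim_raises_isWordCheck : Prop := (∀ (word : String), Dom_isWordCheck word → Raises_isWordCheck word → ¬ Pre_isWordCheck word) ∧ (Dom_isWordCheck (pvRaiseWitness_isWordCheck) ∧ Raises_isWordCheck (pvRaiseWitness_isWordCheck) ∧ isWordCheck_alt (pvRaiseWitness_isWordCheck) = pvRaiseWitnessOut_isWordCheck)

-- ===== LEMMAS AND PROOFS =====

-- run keys of prev :: cs, excluding the first run's key prev
def pvNk (p : Char) : List Char → List Char
  | [] => []
  | c :: t => if c = p then pvNk p t else c :: pvNk c t

theorem keys_eq_nk (cs : List Char) : ∀ (acc : List Char) (p : Char), acc.getLast? = some p →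
    isWordCheckKeys acc cs = acc ++ pvNk p cs := by
  induction cs with
  | nil => intro acc p _; simp [isWordCheckKeys, pvNk]
  | cons c t ih =>
      intro acc p hl
      have hne : acc ≠ [] := by intro h; simp [h] at hl
      simp only [isWordCheckKeys]
      by_cases hc : c = p
      · have hcond : (acc.isEmpty || !(acc.getLast? == some c)) = false := by
          subst hc; simp [hl, hne]
        rw [hcond]
        simp only [Bool.false_eq_true, if_false]
        subst hc
        rw [ih acc c hl]
        simp [pvNk]
      · have hcond : (acc.isEmpty || !(acc.getLast? == some c)) = true := by
          simp [hl]
          exact Or.inr (fun h => hc h.symm)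
        rw [hcond]
        simp only [if_true]
        rw [ih (acc ++ [c]) c (by simp)]
        simp [pvNk, hc]

theorem foldl_add_sublist (xs : List Char) : ∀ s : List Char,
    (xs.foldl PySem.Set.add s).Sublist (s ++ xs) := by
  induction xs with
  | nil => intro s; simp
  | cons x t ih =>
      intro s
      refine (ih (PySem.Set.add s x)).trans ?_
      have : (PySem.Set.add s x).Sublist (s ++ [x]) := by
        unfold PySem.Set.add
        split
        · exact (List.sublist_append_left s [x])
        · exact List.Sublist.refl _
      simpa using this.append_right t

theorem beq_len_iff_nodup (keys : List Char) :
    ((keys.length == (PySem.Set.ofList keys).length) = true) ↔ keys.Nodup := by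
  rw [Nat.beq_eq_true_eq]
  constructor
  · intro h
    have hs : (PySem.Set.ofList keys).Sublist keys := by
      simpa [PySem.Set.ofList, PySem.Set.empty] using foldl_add_sublist keys []
    have := hs.eq_of_length h.symm
    rw [← this]
    exact PySem.Set.nodup_ofList keys
  · intro h
    rw [PySem.Set.ofList_eq_self_of_nodup keys h]

theorem loopA_iff (rest : List Char) : ∀ (p : Char) (dupe : PySem.Dict Char Int),
    dupe.contains p = true →
    (isWordCheckLoop p rest dupe = true ↔
      (pvNk p rest).Nodup ∧ ∀ x ∈ pvNk p rest, dupe.contains x = false) := by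
  induction rest with
  | nil => intro p dupe _; simp [isWordCheckLoop, pvNk]
  | cons c t ih =>
      intro p dupe hp
      by_cases hc : c = p
      · subst hc
        simp only [isWordCheckLoop, beq_self_eq_true, if_pos, hp, pvNk]
        exact ih c dupe hp
      · have hcb : (c == p) = false := by simp [hc]
        simp only [isWordCheckLoop, hcb, Bool.false_eq_true, if_false, pvNk, if_neg hc]
        by_cases hin : dupe.contains c = true
        · simp only [hin, if_true]
          constructor
          · intro h; exact absurd h (by simp)
          · rintro ⟨-, hall⟩
            exact absurd hin (by simp [hall c (by simp)])
        · have hinf : dupe.contains c = false := by simpa using hin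
          simp only [hinf, Bool.false_eq_true, if_false]
          rw [ih c (dupe.insert c 1) (PySem.Dict.contains_insert_self dupe c 1)]
          constructor
          · rintro ⟨hnd, hall⟩
            have hcnot : c ∉ pvNk c t := by
              intro hm
              have := hall c hm
              rw [PySem.Dict.contains_insert] at this
              simp at this
            refine ⟨List.nodup_cons.mpr ⟨hcnot, hnd⟩, ?_⟩
            intro x hx
            rcases List.mem_cons.mp hx with h | h
            · exact h ▸ hinf
            · have := hall x h
              rw [PySem.Dict.contains_insert] at this
              simp at this
              exact this.2
          · rintro ⟨hnd, hall⟩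
            rcases List.nodup_cons.mp hnd with ⟨hcnot, hnd'⟩
            refine ⟨hnd', ?_⟩
            intro x hx
            rw [PySem.Dict.contains_insert]
            have hxc : (x == c) = false := by
              simp; intro h; exact hcnot (h ▸ hx)
            simp [hxc, hall x (List.mem_cons_of_mem _ hx)]

-- ===== VERDICT (by name: the statement is the Claim_ definition above) =====
theorem isWordCheck_spec : Claim_equal_isWordCheck := by
  intro word _ hpre
  unfold Spec_isWordCheck
  have hcs : word.toList ≠ [] := by
    intro h
    exact hpre (String.toList_eq_nil_iff.mp h)
  obtain ⟨c, t, hw⟩ := List.exists_cons_of_ne_nil hcs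
  unfold isWordCheck isWordCheck_alt
  rw [hw]
  have hkeys : isWordCheckKeys [] (c :: t) = c :: pvNk c t := by
    show isWordCheckKeys [] (c :: t) = [c] ++ pvNk c t
    have : isWordCheckKeys [] (c :: t) = isWordCheckKeys [c] t := by
      simp [isWordCheckKeys]
    rw [this, keys_eq_nk t [c] c (by simp)]
  simp only [hkeys]
  rw [Bool.eq_iff_iff, beq_len_iff_nodup, loopA_iff t c _ (PySem.Dict.contains_insert_self _ c 1)]
  rw [List.nodup_cons]
  constructor
  · rintro ⟨hnd, hall⟩
    refine ⟨?_, hnd⟩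
    intro hm
    have := hall c hm
    rw [PySem.Dict.contains_insert_self] at this
    exact absurd this (by simp)
  · rintro ⟨hcm, hnd⟩
    refine ⟨hnd, ?_⟩
    intro x hx
    rw [PySem.Dict.contains_insert]
    have : (x == c) = false := by simp; intro h; exact hcm (h ▸ hx)
    simp [this, PySem.Dict.contains_empty]

@[simp] theorem isWordCheck_raises : Claim_raises_isWordCheck := by
  unfold Claim_raises_isWordCheck
  exact ⟨fun w _ hr => by simp [Raises_isWordCheck] at hr; simp [Pre_isWordCheck, hr], by decide⟩
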